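-- pv_equiv track=rewrite | github.com/darwe33-spec/nba-telegram-agent | nba_nightly_report.py | parse_series_summary
-- ===== SOURCE A (Python) =====
-- def parse_series_summary(summary, t1_abbr, t2_abbr):
--     """מנתח summary כמו 'BOS leads series 1-0' ומחזיר wins1, wins2."""
--     if not summary:
--         return 0, 0, None
--     try:
--         parts = summary.split()
--         # הנחה: 'BOS leads series 1-0' או 'Series tied 1-1'
--         if 'tied' in summary.lower():
--             for p in parts:
--                 if '-' in p:
--                     w1, w2 = p.split('-')
--                     return int(w1), int(w2), None
--         else:
--             leader = parts[0] if parts else None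
--             for p in parts:
--                 if '-' in p:
--                     w1, w2 = p.split('-')
--                     w1, w2 = int(w1), int(w2)
--                     if leader == t1_abbr:
--                         return w1, w2, leader
--                     elif leader == t2_abbr:
--                         return w2, w1, leader
--                     else:
--                         return w1, w2, leader
--     except Exception:
--         pass
--     return 0, 0, None
-- ===== SOURCE B (Python) =====
-- def parse_series_summary(summary, t1_abbr, t2_abbr):
--     """Locate the first '-' directly and slice out its whitespace-delimited token,
--     instead of scanning the split tokens in a loop."""
--     if not summary:
--         return 0, 0, None
--     try:
--         i = summary.find('-')
--         if i < 0:
--             return 0, 0, None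
--         head, tail = summary[:i], summary[i + 1:]
--         left = head.split()[-1] if head and not head[-1].isspace() else ''
--         right = tail.split()[0] if tail and not tail[0].isspace() else ''
--         w1, w2 = (left + '-' + right).split('-')
--         w1, w2 = int(w1), int(w2)
--         if 'tied' in summary.lower():
--             return w1, w2, None
--         leader = summary.split()[0]
--         if leader == t2_abbr and leader != t1_abbr:
--             return w2, w1, leader
--         return w1, w2, leader
--     except Exception:
--         return 0, 0, None
-- ===== Notes on version B (the rewrite author's own statement) =====
-- stated objective: alternative
-- what changed: Instead of A's two explicit loops over the whitespace-split tokens looking for one containing '-', B locates the first '-' directly with str.find and reconstructs its whitespace-delimited token from the surrounding slices, then applies the same split/int/leader logic once.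
import Mathlib
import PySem

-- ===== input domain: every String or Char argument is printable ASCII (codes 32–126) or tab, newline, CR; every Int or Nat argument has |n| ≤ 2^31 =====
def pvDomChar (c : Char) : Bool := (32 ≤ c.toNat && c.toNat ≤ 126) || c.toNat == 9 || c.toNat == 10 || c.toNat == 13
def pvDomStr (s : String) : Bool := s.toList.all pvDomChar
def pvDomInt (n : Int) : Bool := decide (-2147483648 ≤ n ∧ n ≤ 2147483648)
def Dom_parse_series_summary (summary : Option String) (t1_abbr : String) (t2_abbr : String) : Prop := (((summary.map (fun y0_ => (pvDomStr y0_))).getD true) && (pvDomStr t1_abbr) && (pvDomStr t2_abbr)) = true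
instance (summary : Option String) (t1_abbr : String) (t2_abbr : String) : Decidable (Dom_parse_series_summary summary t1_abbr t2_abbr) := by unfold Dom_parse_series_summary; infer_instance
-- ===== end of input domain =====

-- B replaces A's per-token scan loops by locating the first '-' with str.find and slicing
-- out the surrounding whitespace-delimited token (same outputs; objective: alternative).

-- ===== PORT A =====
-- the 'tied' branch loop: for p in parts: if '-' in p: w1, w2 = p.split('-'); return int(w1), int(w2), None
-- (none = the loop fell through or an exception was raised; turned into (0, 0, None) by the caller's getD)
def pvA_tiedLoop : List String → Option (Int × Int × Option String)
  | [] => none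
  | p :: rest =>
    if PySem.Str.isIn "-" p then
      match PySem.Str.split? p "-" with
      | some [w1, w2] =>
        match PySem.Int.ofStr? w1, PySem.Int.ofStr? w2 with
        | some a, some b => some (a, b, none)
        | _, _ => none
      | _ => none
    else pvA_tiedLoop rest

-- the leader-branch loop of A (leader = parts[0] if parts else None)
def pvA_leadLoop (t1_abbr t2_abbr : String) (leader : Option String) : List String → Option (Int × Int × Option String)
  | [] => none
  | p :: rest =>
    if PySem.Str.isIn "-" p then
      match PySem.Str.split? p "-" with
      | some [w1, w2] =>
        match PySem.Int.ofStr? w1, PySem.Int.ofStr? w2 with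
        | some a, some b =>
          if leader == some t1_abbr then some (a, b, leader)
          else if leader == some t2_abbr then some (b, a, leader)
          else some (a, b, leader)
        | _, _ => none
      | _ => none
    else pvA_leadLoop t1_abbr t2_abbr leader rest

def parse_series_summary (summary : Option String) (t1_abbr : String) (t2_abbr : String) : Int × Int × Option String :=
  match summary with
  | none => (0, 0, none)
  | some s =>
    if s = "" then (0, 0, none)
    else
      let parts := PySem.Str.split₀ s
      (if PySem.Str.isIn "tied" (PySem.Str.lower s) then pvA_tiedLoop parts
       else pvA_leadLoop t1_abbr t2_abbr parts.head? parts).getD (0, 0, none)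

-- ===== PORT B =====
-- w1, w2 = (left + '-' + right).split('-'); int(); then the tied / leader branch
-- (none = an exception was raised; turned into (0, 0, None) by the caller's getD)
def pvB_parse (s tok t1_abbr t2_abbr : String) : Option (Int × Int × Option String) :=
  match PySem.Str.split? tok "-" with
  | some [w1, w2] =>
    match PySem.Int.ofStr? w1, PySem.Int.ofStr? w2 with
    | some a, some b =>
      some (if PySem.Str.isIn "tied" (PySem.Str.lower s) then (a, b, none)
            else
              let leader := ((PySem.Str.split₀ s).head?).getD ""
              if leader == t2_abbr && !(leader == t1_abbr) then (b, a, some leader)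
              else (a, b, some leader))
    | _, _ => none
  | _ => none

def parse_series_summary_alt (summary : Option String) (t1_abbr : String) (t2_abbr : String) : Int × Int × Option String :=
  match summary with
  | none => (0, 0, none)
  | some s =>
    if s = "" then (0, 0, none)
    else
      let i := PySem.Str.find s "-"
      if i < 0 then (0, 0, none)
      else
        let head := PySem.Str.slice s none (some i)
        let tail := PySem.Str.slice s (some (i + 1)) none
        -- left = head.split()[-1] if head and not head[-1].isspace() else ''
        let left :=
          match PySem.Str.pyGet? head (-1) with
          | none => ""
          | some c =>
            if PySem.Chars.isspace c then ""
            else (PySem.List.pyGet? (PySem.Str.split₀ head) (-1)).getD ""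
        -- right = tail.split()[0] if tail and not tail[0].isspace() else ''
        let right :=
          match PySem.Str.pyGet? tail 0 with
          | none => ""
          | some c =>
            if PySem.Chars.isspace c then ""
            else (PySem.List.pyGet? (PySem.Str.split₀ tail) 0).getD ""
        (pvB_parse s (left ++ "-" ++ right) t1_abbr t2_abbr).getD (0, 0, none)

-- ===== PRECONDITION & SPEC =====
def Spec_parse_series_summary (summary : Option String) (t1_abbr : String) (t2_abbr : String) (out : Int × Int × Option String) : Prop := out = parse_series_summary_alt summary t1_abbr t2_abbr
instance (summary : Option String) (t1_abbr : String) (t2_abbr : String) (out : Int × Int × Option String) : Decidable (Spec_parse_series_summary summary t1_abbr t2_abbr out) := by unfold Spec_parse_series_summary; infer_instance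

-- ===== CLAIM (what is proved, stated in full; the proofs are below) =====
def Claim_equal_parse_series_summary : Prop := ∀ (summary : Option String) (t1_abbr : String) (t2_abbr : String), Dom_parse_series_summary summary t1_abbr t2_abbr → Spec_parse_series_summary summary t1_abbr t2_abbr (parse_series_summary summary t1_abbr t2_abbr)

-- ===== LEMMAS AND PROOFS =====

-- a non-accumulator reformulation of PySem.Chars.split₀
def pvF : List Char → List Char → List (List Char)
  | [], cur => if cur.isEmpty then [] else [cur.reverse]
  | c :: rest, cur =>
    if PySem.Chars.isspace c then
      (if cur.isEmpty then pvF rest [] else cur.reverse :: pvF rest [])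
    else pvF rest (c :: cur)

-- the whitespace-delimited run that ends exactly where the given suffix begins
def pvTL : List Char → List Char → List Char
  | cur, [] => cur.reverse
  | cur, c :: p => if PySem.Chars.isspace c then pvTL [] p else pvTL (c :: cur) p

theorem pvTL_cons (cur : List Char) (c : Char) (p : List Char) :
    pvTL cur (c :: p) = if PySem.Chars.isspace c then pvTL [] p else pvTL (c :: cur) p := rfl

theorem pvF_cons (c : Char) (rest cur : List Char) :
    pvF (c :: rest) cur =
      if PySem.Chars.isspace c then
        (if cur.isEmpty then pvF rest [] else cur.reverse :: pvF rest [])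
      else pvF rest (c :: cur) := rfl

theorem go_eq_pvF : ∀ (cs cur : List Char) (acc : List (List Char)),
    PySem.Chars.split₀.go cs cur acc = acc.reverse ++ pvF cs cur := by
  intro cs
  induction cs with
  | nil => intro cur acc; simp only [PySem.Chars.split₀.go, pvF]; split <;> simp
  | cons c rest ih =>
    intro cur acc
    simp only [PySem.Chars.split₀.go, pvF_cons]
    split
    · split
      · exact ih [] acc
      · rw [ih [] (cur.reverse :: acc)]; simp
    · exact ih _ acc

theorem split₀_eq_pvF (cs : List Char) : PySem.Chars.split₀ cs = pvF cs [] := by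
  rw [PySem.Chars.split₀, go_eq_pvF]; rfl

theorem pvF_run : ∀ (cs cur : List Char), cur ≠ [] →
    pvF cs cur = (cur.reverse ++ cs.takeWhile (fun c => !PySem.Chars.isspace c))
      :: pvF (cs.dropWhile (fun c => !PySem.Chars.isspace c)) [] := by
  intro cs
  induction cs with
  | nil => intro cur h; simp [pvF, List.isEmpty_iff, h]
  | cons c rest ih =>
    intro cur h
    by_cases hc : PySem.Chars.isspace c
    · simp [pvF, hc, List.isEmpty_iff, h]
    · simp only [pvF, hc, List.takeWhile_cons, List.dropWhile_cons, Bool.not_eq_true']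
      rw [ih (c :: cur) (by simp)]
      simp [hc]

theorem pvF_mem : ∀ (cs cur : List Char) (tok : List Char), tok ∈ pvF cs cur →
    ∀ a ∈ tok, a ∈ cs ∨ a ∈ cur := by
  intro cs
  induction cs with
  | nil =>
    intro cur tok htok a ha
    simp [pvF] at htok
    rcases htok with ⟨-, rfl⟩
    right; simpa using ha
  | cons c rest ih =>
    intro cur tok htok a ha
    by_cases hc : PySem.Chars.isspace c
    · simp only [pvF, hc, if_true] at htok
      by_cases hcur : cur.isEmpty
      · rw [if_pos hcur] at htok
        rcases ih [] tok htok a ha with h | h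
        · exact Or.inl (by simp [h])
        · simp at h
      · rw [if_neg hcur] at htok
        rcases List.mem_cons.mp htok with rfl | htok
        · right; simpa using ha
        · rcases ih [] tok htok a ha with h | h
          · exact Or.inl (by simp [h])
          · simp at h
    · simp only [pvF, hc] at htok
      rcases ih _ tok htok a ha with h | h
      · exact Or.inl (by simp [h])
      · rcases List.mem_cons.mp h with rfl | h
        · exact Or.inl (by simp)
        · exact Or.inr h

theorem pvF_find_none (cs cur : List Char) (h : '-' ∉ cs) (h2 : '-' ∉ cur) :
    (pvF cs cur).find? (fun tok => decide ('-' ∈ tok)) = none := by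
  rw [List.find?_eq_none]
  intro tok htok
  simp only [decide_eq_true_eq]
  intro hd
  rcases pvF_mem cs cur tok htok '-' hd with hh | hh
  · exact h hh
  · exact h2 hh

theorem pvF_find_dash : ∀ (pre : List Char) (cur post : List Char), '-' ∉ pre → '-' ∉ cur →
    (pvF (pre ++ '-' :: post) cur).find? (fun tok => decide ('-' ∈ tok)) =
      some (pvTL cur pre ++ '-' :: post.takeWhile (fun c => !PySem.Chars.isspace c)) := by
  intro pre
  induction pre with
  | nil =>
    intro cur post hpre hcur
    have hdash : PySem.Chars.isspace '-' = false := by decide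
    rw [List.nil_append, pvF_cons, if_neg (by simp [hdash])]
    rw [pvF_run post ('-' :: cur) (by simp)]
    rw [List.find?_cons_of_pos (by simp)]
    simp [pvTL]
  | cons c p ih =>
    intro cur post hpre hcur
    have hcp : '-' ∉ p := fun hh => hpre (List.mem_cons_of_mem _ hh)
    have hcd : c ≠ '-' := fun hh => hpre (by simp [hh])
    by_cases hc : PySem.Chars.isspace c
    · simp only [List.cons_append, pvF, hc, if_true]
      by_cases hcure : cur.isEmpty
      · rw [if_pos hcure, ih [] post hcp (by simp)]
        simp [pvTL, hc]
      · rw [if_neg hcure]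
        rw [List.find?_cons_of_neg (by simp [List.mem_reverse]; exact fun hh => hcur hh)]
        rw [ih [] post hcp (by simp)]
        simp [pvTL, hc]
    · have hc' : PySem.Chars.isspace c = false := by simpa using hc
      simp only [List.cons_append, pvF, hc', Bool.false_eq_true, if_false]
      rw [ih (c :: cur) post hcp (by simp [hcur, Ne.symm hcd])]
      simp [pvTL, hc']

theorem pvTL_last_space : ∀ (pre : List Char) (cur : List Char) (c : Char),
    pre.getLast? = some c → PySem.Chars.isspace c = true → pvTL cur pre = [] := by
  intro pre
  induction pre with
  | nil => intro cur c h; simp at h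
  | cons c0 p ih =>
    intro cur c h hsp
    cases p with
    | nil =>
      simp at h
      subst h
      simp [pvTL, hsp]
    | cons c1 p' =>
      rw [List.getLast?_cons_cons] at h
      by_cases hc0 : PySem.Chars.isspace c0
      · simp [pvTL, hc0]; exact ih [] c h hsp
      · simp [pvTL, hc0]; exact ih _ c h hsp

theorem pv_getLast?_cons {α : Type} {a : α} {l : List α} (h : l ≠ []) :
    (a :: l).getLast? = l.getLast? := by
  cases l with
  | nil => simp at h
  | cons b m => exact List.getLast?_cons_cons ..

theorem pvF_ne_nil : ∀ (cs cur : List Char) (c : Char),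
    cs.getLast? = some c → PySem.Chars.isspace c = false → pvF cs cur ≠ [] := by
  intro cs
  induction cs with
  | nil => intro cur c h; simp at h
  | cons c0 p ih =>
    intro cur c h hsp
    cases p with
    | nil =>
      simp at h; subst h
      simp [pvF, hsp]
    | cons c1 p' =>
      rw [List.getLast?_cons_cons] at h
      by_cases hc0 : PySem.Chars.isspace c0
      · by_cases hcur : cur.isEmpty <;> simp [pvF, hc0, hcur]
        · exact ih [] c h hsp
      · simp only [pvF, hc0]
        exact ih _ c h hsp

theorem pvF_getLast : ∀ (pre : List Char) (cur : List Char) (c : Char),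
    pre.getLast? = some c → PySem.Chars.isspace c = false →
    (pvF pre cur).getLast? = some (pvTL cur pre) := by
  intro pre
  induction pre with
  | nil => intro cur c h; simp at h
  | cons c0 p ih =>
    intro cur c h hsp
    cases p with
    | nil =>
      simp at h; subst h
      simp [pvF, hsp, pvTL]
    | cons c1 p' =>
      rw [List.getLast?_cons_cons] at h
      rw [pvF_cons]
      by_cases hc0 : PySem.Chars.isspace c0 = true
      · rw [if_pos hc0]
        have hne := pvF_ne_nil (c1 :: p') [] c h hsp
        by_cases hcur : cur.isEmpty
        · rw [if_pos hcur, ih [] c h hsp]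
          simp [pvTL, hc0]
        · rw [if_neg hcur, pv_getLast?_cons hne, ih [] c h hsp]
          simp [pvTL, hc0]
      · rw [if_neg hc0, ih _ c h hsp]
        conv_rhs => rw [pvTL_cons, if_neg hc0]

theorem pvF_head (c : Char) (rest : List Char) (h : PySem.Chars.isspace c = false) :
    (pvF (c :: rest) []).head? = some ((c :: rest).takeWhile (fun x => !PySem.Chars.isspace x)) := by
  simp only [pvF, h, Bool.false_eq_true, if_false, List.isEmpty_nil]
  rw [pvF_run rest [c] (by simp)]
  simp [h]

theorem pyGet_zero {α : Type} (xs : List α) : PySem.List.pyGet? xs 0 = xs.head? := by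
  cases xs <;> simp [PySem.List.pyGet?, PySem.List.pyIdx?]

theorem pyGet_neg_one {α : Type} (xs : List α) (h : xs ≠ []) :
    PySem.List.pyGet? xs (-1) = xs.getLast? := by
  have hl : xs.length ≠ 0 := by simpa using h
  simp [PySem.List.pyGet?, PySem.List.pyIdx?, show -(xs.length : Int) ≤ -1 by omega,
    List.getLast?_eq_getElem?]

theorem singleton_prefix_iff (a : Char) (l : List Char) : [a] <+: l ↔ l.head? = some a := by
  cases l with
  | nil => simp
  | cons x xs => simp [List.cons_prefix_cons, eq_comm]

theorem hasDash_eq (p : String) :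
    PySem.Str.isIn "-" p = decide ('-' ∈ p.toList) := by
  have key : PySem.Str.isIn "-" p = true ↔ '-' ∈ p.toList := by
    rw [PySem.Str.isIn_iff_infix, show ("-" : String).toList = ['-'] from rfl,
      List.singleton_infix_iff]
  by_cases hm : '-' ∈ p.toList
  · rw [key.mpr hm, decide_eq_true hm]
  · have h2 : PySem.Str.isIn "-" p = false :=
      Bool.not_eq_true _ |>.mp (fun h => hm (key.mp h))
    rw [h2, decide_eq_false hm]

-- per-token parse: w1, w2 = p.split('-'); int(w1), int(w2)
def pvParse2 (p : String) : Option (Int × Int) :=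
  match PySem.Str.split? p "-" with
  | some [w1, w2] =>
    match PySem.Int.ofStr? w1, PySem.Int.ofStr? w2 with
    | some a, some b => some (a, b)
    | _, _ => none
  | _ => none

theorem tiedLoop_eq (parts : List String) :
    pvA_tiedLoop parts = (parts.find? (fun p => PySem.Str.isIn "-" p)).bind
      (fun p => (pvParse2 p).map (fun ab => (ab.1, ab.2, none))) := by
  induction parts with
  | nil => rfl
  | cons p rest ih =>
    by_cases hp : PySem.Str.isIn "-" p = true
    · rw [List.find?_cons_of_pos hp, Option.bind_some]
      simp only [pvA_tiedLoop, hp, if_true, pvParse2]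
      rcases hsp : PySem.Str.split? p "-" with _ | ws
      · rfl
      rcases ws with _ | ⟨w1, _ | ⟨w2, _ | _⟩⟩ <;> try rfl
      simp only []
      cases ha : PySem.Int.ofStr? w1 <;> cases hb : PySem.Int.ofStr? w2 <;> rfl
    · rw [List.find?_cons_of_neg hp]
      simp only [pvA_tiedLoop, Bool.not_eq_true _ |>.mp hp, Bool.false_eq_true, if_false]
      exact ih

theorem leadLoop_eq (t1 t2 : String) (ld : Option String) (parts : List String) :
    pvA_leadLoop t1 t2 ld parts = (parts.find? (fun p => PySem.Str.isIn "-" p)).bind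
      (fun p => (pvParse2 p).map (fun ab =>
        if ld == some t1 then (ab.1, ab.2, ld)
        else if ld == some t2 then (ab.2, ab.1, ld)
        else (ab.1, ab.2, ld))) := by
  induction parts with
  | nil => rfl
  | cons p rest ih =>
    by_cases hp : PySem.Str.isIn "-" p = true
    · rw [List.find?_cons_of_pos hp, Option.bind_some]
      simp only [pvA_leadLoop, hp, if_true, pvParse2]
      rcases hsp : PySem.Str.split? p "-" with _ | ws
      · rfl
      rcases ws with _ | ⟨w1, _ | ⟨w2, _ | _⟩⟩ <;> try rfl
      simp only []
      cases ha : PySem.Int.ofStr? w1 <;> cases hb : PySem.Int.ofStr? w2 <;>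
        first
        | rfl
        | (simp only []; split_ifs <;> rfl)
    · rw [List.find?_cons_of_neg hp]
      simp only [pvA_leadLoop, Bool.not_eq_true _ |>.mp hp, Bool.false_eq_true, if_false]
      exact ih

theorem pvB_parse_eq (s tok t1 t2 : String) :
    pvB_parse s tok t1 t2 = (pvParse2 tok).map (fun ab =>
      if PySem.Str.isIn "tied" (PySem.Str.lower s) then (ab.1, ab.2, none)
      else
        let leader := ((PySem.Str.split₀ s).head?).getD ""
        if leader == t2 && !(leader == t1) then (ab.2, ab.1, some leader)
        else (ab.1, ab.2, some leader)) := by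
  simp only [pvB_parse, pvParse2]
  rcases hsp : PySem.Str.split? tok "-" with _ | ws
  · rfl
  rcases ws with _ | ⟨w1, _ | ⟨w2, _ | _⟩⟩ <;> try rfl
  simp only []
  cases ha : PySem.Int.ofStr? w1 <;> cases hb : PySem.Int.ofStr? w2 <;> rfl

-- the String-level first dash-bearing token of s.split()
theorem find_dash_token (s : String) :
    (PySem.Str.split₀ s).find? (fun p => PySem.Str.isIn "-" p) =
      Option.map String.ofList
        ((pvF s.toList []).find? (fun tok => decide ('-' ∈ tok))) := by
  have hmap : List.map String.toList (PySem.Str.split₀ s) = pvF s.toList [] := by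
    rw [PySem.Str.split₀_map_toList, split₀_eq_pvF]
  have hq : (fun tok : List Char => decide ('-' ∈ tok)) ∘ String.toList
      = (fun p : String => PySem.Str.isIn "-" p) := by
    funext p; exact (hasDash_eq p).symm
  rw [← hmap, List.find?_map, hq]
  rcases hf : (PySem.Str.split₀ s).find? (fun p => PySem.Str.isIn "-" p) with _ | p
  · rfl
  · simp only [Option.map_some]
    congr 1
    exact (String.toList_inj.mp (by simp)).symm


-- B's left fragment: head.split()[-1]-or-'' equals the trailing nonspace run of pre
theorem B_left_eq (head : String) (pre : List Char) (hh : head.toList = pre) :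
    (match PySem.Str.pyGet? head (-1) with
     | none => ""
     | some c =>
       if PySem.Chars.isspace c then ""
       else (PySem.List.pyGet? (PySem.Str.split₀ head) (-1)).getD "").toList
    = pvTL [] pre := by
  rw [PySem.Str.pyGet?_eq, hh]
  rcases hne : pre with _ | ⟨c0, pre'⟩
  · simp [PySem.Chars.pyGet?, PySem.List.pyGet?, PySem.List.pyIdx?, pvTL]
  · rw [← hne]
    have hpre_ne : pre ≠ [] := by rw [hne]; simp
    have : PySem.Chars.pyGet? pre (-1) = pre.getLast? := pyGet_neg_one pre hpre_ne
    rw [this]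
    obtain ⟨c, hc⟩ : ∃ c, pre.getLast? = some c := by
      rcases h : pre.getLast? with _ | c
      · rw [List.getLast?_eq_none_iff] at h; exact absurd h hpre_ne
      · exact ⟨c, rfl⟩
    rw [hc]
    by_cases hsp : PySem.Chars.isspace c = true
    · simp only [hsp, if_true]
      rw [pvTL_last_space pre [] c hc hsp]
      rfl
    · have hsp' : PySem.Chars.isspace c = false := by simpa using hsp
      simp only [hsp', Bool.false_eq_true, if_false]
      have hmap : List.map String.toList (PySem.Str.split₀ head) = pvF pre [] := by
        rw [PySem.Str.split₀_map_toList, hh, split₀_eq_pvF]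
      have hgl : (pvF pre []).getLast? = some (pvTL [] pre) := pvF_getLast pre [] c hc hsp'
      have hgl2 : Option.map String.toList (PySem.Str.split₀ head).getLast? = some (pvTL [] pre) := by
        rw [← List.getLast?_map, hmap, hgl]
      obtain ⟨w, hw1, hw2⟩ := Option.map_eq_some_iff.mp hgl2
      have hne2 : PySem.Str.split₀ head ≠ [] := by
        intro hcon; rw [hcon] at hw1; simp at hw1
      rw [pyGet_neg_one _ hne2, hw1, Option.getD_some, hw2]

-- B's right fragment: tail.split()[0]-or-'' equals the leading nonspace run of post
theorem B_right_eq (tail : String) (post : List Char) (ht : tail.toList = post) :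
    (match PySem.Str.pyGet? tail 0 with
     | none => ""
     | some c =>
       if PySem.Chars.isspace c then ""
       else (PySem.List.pyGet? (PySem.Str.split₀ tail) 0).getD "").toList
    = post.takeWhile (fun c => !PySem.Chars.isspace c) := by
  rw [PySem.Str.pyGet?_eq, ht]
  have h0 : PySem.Chars.pyGet? post 0 = post.head? := pyGet_zero post
  rw [h0]
  rcases hp : post with _ | ⟨c, rest⟩
  · simp
  · simp only [List.head?_cons]
    by_cases hsp : PySem.Chars.isspace c = true
    · simp [hsp]
    · have hsp' : PySem.Chars.isspace c = false := by simpa using hsp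
      simp only [hsp', Bool.false_eq_true, if_false]
      have hmap : List.map String.toList (PySem.Str.split₀ tail) = pvF (c :: rest) [] := by
        rw [PySem.Str.split₀_map_toList, ht, hp, split₀_eq_pvF]
      have hhd : (pvF (c :: rest) []).head? =
          some ((c :: rest).takeWhile (fun x => !PySem.Chars.isspace x)) := pvF_head c rest hsp'
      have hhd2 : Option.map String.toList (PySem.Str.split₀ tail).head?
          = some ((c :: rest).takeWhile (fun x => !PySem.Chars.isspace x)) := by
        rw [← List.head?_map, hmap, hhd]
      obtain ⟨w, hw1, hw2⟩ := Option.map_eq_some_iff.mp hhd2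
      rw [pyGet_zero, hw1, Option.getD_some, hw2]

theorem parse_series_summary_spec : Claim_equal_parse_series_summary := by
  intro summary t1 t2 _hdom
  unfold Spec_parse_series_summary
  cases summary with
  | none => rfl
  | some s =>
    by_cases hs : s = ""
    · simp [parse_series_summary, parse_series_summary_alt, hs]
    · have hfeq : PySem.Str.find s "-" = PySem.Chars.find s.toList ['-'] := by
        rw [PySem.Str.find_eq]; rfl
      by_cases hneg : PySem.Str.find s "-" < 0
      · -- no '-' anywhere in s: both return (0, 0, none)
        have hi : PySem.Chars.find s.toList ['-'] = -1 := by
          have h1 := PySem.Chars.neg_one_le_find s.toList ['-']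
          omega
        have hnd : '-' ∉ s.toList := by
          have := (PySem.Chars.find_eq_neg_one_iff s.toList ['-']).mp hi
          rwa [List.singleton_infix_iff] at this
        have hfq : (PySem.Str.split₀ s).find? (fun p => PySem.Str.isIn "-" p) = none := by
          rw [find_dash_token, pvF_find_none _ _ hnd (by simp)]; rfl
        simp only [parse_series_summary, parse_series_summary_alt, if_neg hs, if_pos hneg]
        rw [tiedLoop_eq, leadLoop_eq, hfq]
        split <;> rfl
      · -- the first '-' is at index n
        have hpos : 0 ≤ PySem.Chars.find s.toList ['-'] := by omega
        set n := (PySem.Chars.find s.toList ['-']).toNat with hn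
        have hcast : PySem.Chars.find s.toList ['-'] = (n : Int) := (Int.toNat_of_nonneg hpos).symm
        obtain ⟨hprefix, hmin⟩ := PySem.Chars.find_spec (s := s.toList) (sub := ['-']) hpos
        have hhead : (s.toList.drop n).head? = some '-' := (singleton_prefix_iff _ _).mp hprefix
        obtain ⟨postt, hposteq⟩ := List.head?_eq_some_iff.mp hhead
        have hpost : postt = s.toList.drop (n + 1) := by
          rw [← List.tail_drop, hposteq]
          rfl
        have hdec : s.toList = s.toList.take n ++ '-' :: s.toList.drop (n + 1) := by
          conv_lhs => rw [← List.take_append_drop n s.toList]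
          rw [hposteq, hpost]
        have hnd : '-' ∉ s.toList.take n := by
          intro hmem
          obtain ⟨j, hj, hje⟩ := List.getElem_of_mem hmem
          have hjn : j < n := lt_of_lt_of_le hj (by simp)
          apply hmin j hjn
          rw [singleton_prefix_iff, List.head?_drop]
          have hjl : j < s.toList.length :=
            lt_of_lt_of_le hj (by simp)
          rw [List.getElem?_eq_getElem hjl]
          rw [← List.getElem_take (xs := s.toList) (j := n) (h := hj), hje]
        set T := pvTL [] (s.toList.take n) ++ '-' ::
          ((s.toList.drop (n + 1)).takeWhile (fun c => !PySem.Chars.isspace c)) with hT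
        have hfindT : (pvF s.toList []).find? (fun tok => decide ('-' ∈ tok)) = some T := by
          conv_lhs => rw [hdec]
          exact pvF_find_dash _ [] _ hnd (by simp)
        have hfp : (PySem.Str.split₀ s).find? (fun p => PySem.Str.isIn "-" p)
            = some (String.ofList T) := by
          rw [find_dash_token, hfindT]; rfl
        have hheadL : (PySem.Str.slice s none (some (PySem.Str.find s "-"))).toList
            = s.toList.take n := by
          rw [PySem.Str.toList_slice, hfeq, hcast]
          exact PySem.List.slice_to_natCast _ _
        have htailL : (PySem.Str.slice s (some (PySem.Str.find s "-" + 1)) none).toList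
            = s.toList.drop (n + 1) := by
          rw [PySem.Str.toList_slice, hfeq, hcast,
            show ((n : Int) + 1) = ((n + 1 : ℕ) : Int) by push_cast; ring]
          exact PySem.List.slice_from_natCast _ _
        have hL := B_left_eq _ _ hheadL
        have hR := B_right_eq _ _ htailL
        -- both sides now reduce to the same token String.ofList T
        simp only [parse_series_summary, parse_series_summary_alt, if_neg hs, if_neg hneg]
        rw [tiedLoop_eq, leadLoop_eq, hfp, Option.bind_some, Option.bind_some]
        have htok : (match PySem.Str.pyGet? (PySem.Str.slice s none (some (PySem.Str.find s "-"))) (-1) with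
             | none => ""
             | some c =>
               if PySem.Chars.isspace c then ""
               else (PySem.List.pyGet? (PySem.Str.split₀ (PySem.Str.slice s none (some (PySem.Str.find s "-")))) (-1)).getD "")
            ++ "-" ++
            (match PySem.Str.pyGet? (PySem.Str.slice s (some (PySem.Str.find s "-" + 1)) none) 0 with
             | none => ""
             | some c =>
               if PySem.Chars.isspace c then ""
               else (PySem.List.pyGet? (PySem.Str.split₀ (PySem.Str.slice s (some (PySem.Str.find s "-" + 1)) none)) 0).getD "")
            = String.ofList T := by
          apply String.toList_inj.mp
          simp only [String.toList_append, hL, hR]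
          simp [hT]
        rw [htok, pvB_parse_eq]
        -- compare the two branch shapes
        have hpne : PySem.Str.split₀ s ≠ [] := by
          intro hcon
          rw [hcon] at hfp
          simp at hfp
        rcases hparts : PySem.Str.split₀ s with _ | ⟨hd, tlp⟩
        · exact absurd hparts hpne
        by_cases htied : PySem.Str.isIn "tied" (PySem.Str.lower s) = true
        · simp only [htied, if_true]
        · have htied' : PySem.Str.isIn "tied" (PySem.Str.lower s) = false := by simpa using htied
          simp only [htied', Bool.false_eq_true, if_false, List.head?_cons, Option.getD_some]
          rcases hpp : pvParse2 (String.ofList T) with _ | ab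
          · rfl
          · simp only [Option.map_some, Option.getD_some]
            by_cases h1 : hd = t1 <;> by_cases h2 : hd = t2 <;>
              simp [h1, h2]

-- ===== VERDICT (by name: the statement is the Claim_ definition above) =====
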